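-- pv_equiv track=rewrite | github.com/MPIIComputationalEpigenetics/DeepBlue-Populator | src/util.py | clean_term
-- ===== SOURCE A (Python) =====
-- def clean_term(string):
--     new = ""
--     consume = False
--     for c in string:
--         if c == '(':
--             consume = True
--         elif c == ')':
--             consume = False
--         elif not consume and c not in ['(', ')', '_', '_', '-', '+', '.']:
--             new += c
--
--     return new.strip().lower()
-- ===== SOURCE B (Python) =====
-- import re
--
-- def clean_term(string):
--     out = re.sub(r'\([^)]*\)?', '', string)
--     out = out.translate(str.maketrans('', '', '()_-+.'))
--     return out.strip().lower()
-- ===== Notes on version B (the rewrite author's own statement) =====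
-- stated objective: faster
-- what changed: Replaces the char-by-char consume-flag state machine that grows a string one character at a time with a regex substitution deleting each parenthesized run followed by a str.translate deletion table for the punctuation and stray brackets.
import Mathlib
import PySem

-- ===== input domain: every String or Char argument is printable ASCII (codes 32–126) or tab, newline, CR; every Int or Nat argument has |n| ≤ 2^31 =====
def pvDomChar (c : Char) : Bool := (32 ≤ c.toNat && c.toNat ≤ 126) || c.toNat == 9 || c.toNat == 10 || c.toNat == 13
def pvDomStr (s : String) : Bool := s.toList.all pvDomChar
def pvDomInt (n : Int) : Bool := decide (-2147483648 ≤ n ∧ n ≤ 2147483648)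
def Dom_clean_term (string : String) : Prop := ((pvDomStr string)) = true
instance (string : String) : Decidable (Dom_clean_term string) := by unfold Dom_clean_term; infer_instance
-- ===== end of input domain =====

-- B replaces A's consume-flag state machine by a regex-style paren-region deletion plus a
-- translation-table character removal (objective: idiomatic). Return values agree everywhere.

-- ===== PORT A =====
-- the body of A's for-loop (Python string concatenation modeled as List Char, exact on the domain)
def pvStepA (st : List Char × Bool) (c : Char) : List Char × Bool :=
  if c = '(' then (st.1, true)
  else if c = ')' then (st.1, false)
  else if !st.2 && !(['(', ')', '_', '_', '-', '+', '.'].contains c) then (st.1 ++ [c], st.2)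
  else st

def clean_term (string : String) : String :=
  let r := string.toList.foldl pvStepA ([], false)
  String.ofList (PySem.Chars.lower (PySem.Chars.strip r.1))

-- ===== PORT B =====
-- hand port of Source B's regex r'\([^)]*\)?' (PySem has no regex): one match consumes a '(' plus
-- everything up to and including the first following ')' (or to end of string); re.sub deletes
-- each such non-overlapping match left to right — exact.
def pvDropClose : List Char → List Char
  | [] => []
  | c :: rest => if c = ')' then rest else pvDropClose rest

theorem pvDropClose_length_le : ∀ (l : List Char), (pvDropClose l).length ≤ l.length := by
  intro l
  induction l with
  | nil => simp [pvDropClose]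
  | cons c rest ih =>
    simp only [pvDropClose]
    split
    · simp
    · exact le_trans ih (by simp)

def pvStripParens : List Char → List Char
  | [] => []
  | c :: rest =>
    if c = '(' then pvStripParens (pvDropClose rest) else c :: pvStripParens rest
termination_by l => l.length
decreasing_by
  · have := pvDropClose_length_le rest; simp; omega
  · simp

-- str.translate with the deletion table maketrans('', '', '()_-+.') — exact: deletes exactly those chars
def pvDeleted (c : Char) : Bool := ['(', ')', '_', '-', '+', '.'].contains c

def clean_term_alt (string : String) : String :=
  let noParens := pvStripParens string.toList
  let cleaned := noParens.filter (fun c => !pvDeleted c)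
  String.ofList (PySem.Chars.lower (PySem.Chars.strip cleaned))

-- ===== PRECONDITION & SPEC =====
def Spec_clean_term (string : String) (out : String) : Prop := out = clean_term_alt string
instance (string : String) (out : String) : Decidable (Spec_clean_term string out) := by unfold Spec_clean_term; infer_instance

-- ===== CLAIM (what is proved, stated in full; the proofs are below) =====
def Claim_equal_clean_term : Prop := ∀ (string : String), Dom_clean_term string → Spec_clean_term string (clean_term string)

-- ===== LEMMAS AND PROOFS =====

-- A's filter list coincides with B's deletion set (the duplicated '_' in A's list is redundant)
theorem pvContains_eq (c : Char) :
    (['(', ')', '_', '_', '-', '+', '.'].contains c) = pvDeleted c := by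
  simp only [pvDeleted, List.contains_cons, List.contains_nil]
  cases (c == '_') <;> simp

-- while consume=True, A's loop only waits for the next ')': same as restarting after pvDropClose
theorem foldl_consume (l : List Char) : ∀ (acc : List Char),
    (List.foldl pvStepA (acc, true) l).1 = (List.foldl pvStepA (acc, false) (pvDropClose l)).1 := by
  induction l with
  | nil => intro acc; simp [pvDropClose]
  | cons c rest ih =>
    intro acc
    by_cases hc : c = ')'
    · subst hc; simp [pvStepA, pvDropClose]
    · have hstep : pvStepA (acc, true) c = (acc, true) := by
        simp only [pvStepA, if_neg hc]
        split
        · rfl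
        · simp
      simp only [List.foldl_cons, hstep, pvDropClose, if_neg hc]
      exact ih acc

-- what A's loop body does to an open (consume=False) state on a non-'(' character
theorem pvStepA_open (acc : List Char) (c : Char) (h : ¬ c = '(') :
    pvStepA (acc, false) c = if pvDeleted c then (acc, false) else (acc ++ [c], false) := by
  simp only [pvStepA, if_neg h, Bool.not_false, Bool.true_and, pvContains_eq]
  by_cases hc : c = ')'
  · subst hc; simp [pvDeleted]
  · rw [if_neg hc]
    by_cases hp : pvDeleted c <;> simp [hp]

-- A's loop from consume=False collects exactly B's filtered paren-free text
theorem foldl_open (l : List Char) : ∀ (acc : List Char),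
    (List.foldl pvStepA (acc, false) l).1 = acc ++ (pvStripParens l).filter (fun c => !pvDeleted c) := by
  induction l using pvStripParens.induct with
  | case1 => simp [pvStripParens]
  | case2 rest ih =>
    intro acc
    simp only [List.foldl_cons]
    rw [show pvStepA (acc, false) '(' = (acc, true) from rfl, foldl_consume, ih, pvStripParens]
    simp
  | case3 c rest h ih =>
    intro acc
    simp only [List.foldl_cons, pvStepA_open acc c h]
    by_cases hp : pvDeleted c
    · rw [if_pos hp, ih]
      simp [pvStripParens, if_neg h, hp]
    · rw [if_neg hp, ih]
      simp [pvStripParens, if_neg h, hp]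

-- ===== VERDICT (by name: the statement is the Claim_ definition above) =====
theorem clean_term_spec : Claim_equal_clean_term := by
  intro s _
  show _ = _
  simp only [clean_term, clean_term_alt, foldl_open, List.nil_append]
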